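-- pv_equiv track=rewrite | github.com/Kiran3100/Hostel-Main | app/services/analytics/predictive_analytics_service.py | _generate_churn_mitigation_recommendations
-- ===== SOURCE A (Python) =====
-- from typing import Optional, Dict, Any, List, Tuple
--
-- def _generate_churn_mitigation_recommendations(
--
--     risk_factors: List[Dict[str, Any]],
-- ) -> List[str]:
--     """Generate recommendations to mitigate churn."""
--     recommendations = []
--
--     factor_types = [f['factor'] for f in risk_factors]
--
--     if 'declining_bookings' in factor_types:
--         recommendations.append("Implement targeted marketing campaigns to re-engage customers")
--         recommendations.append("Offer loyalty rewards or discounts to previous customers")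
--
--     if 'high_cancellation_rate' in factor_types:
--         recommendations.append("Review cancellation policy and booking process")
--         recommendations.append("Implement pre-arrival communication to reduce cancellations")
--
--     if 'low_satisfaction' in factor_types:
--         recommendations.append("Conduct customer feedback survey to identify issues")
--         recommendations.append("Invest in service quality improvements")
--
--     if not recommendations:
--         recommendations.append("Continue monitoring key metrics")
--
--     return recommendations
-- ===== SOURCE B (Python) =====
-- _DB = ["Implement targeted marketing campaigns to re-engage customers",
--        "Offer loyalty rewards or discounts to previous customers"]
-- _HC = ["Review cancellation policy and booking process",
--        "Implement pre-arrival communication to reduce cancellations"]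
-- _LS = ["Conduct customer feedback survey to identify issues",
--        "Invest in service quality improvements"]
--
-- # Precomputed outcomes for every combination of present factor flags.
-- _TABLE = {
--     (db, hc, ls): (_DB * db + _HC * hc + _LS * ls) or ["Continue monitoring key metrics"]
--     for db in (False, True) for hc in (False, True) for ls in (False, True)
-- }
--
-- def _generate_churn_mitigation_recommendations(risk_factors):
--     """Generate recommendations to mitigate churn (single pass + full outcome table)."""
--     db = hc = ls = False
--     for f in risk_factors:
--         t = f['factor']
--         db = db or t == 'declining_bookings'
--         hc = hc or t == 'high_cancellation_rate'
--         ls = ls or t == 'low_satisfaction'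
--     return list(_TABLE[(db, hc, ls)])
-- ===== Notes on version B (the rewrite author's own statement) =====
-- stated objective: alternative
-- what changed: Replaces A's three separate membership scans and incremental appends with one single pass accumulating three presence flags plus a precomputed lookup table of all 8 possible outputs (the empty fallback is an entry of the table, not a post-check).
import Mathlib
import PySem

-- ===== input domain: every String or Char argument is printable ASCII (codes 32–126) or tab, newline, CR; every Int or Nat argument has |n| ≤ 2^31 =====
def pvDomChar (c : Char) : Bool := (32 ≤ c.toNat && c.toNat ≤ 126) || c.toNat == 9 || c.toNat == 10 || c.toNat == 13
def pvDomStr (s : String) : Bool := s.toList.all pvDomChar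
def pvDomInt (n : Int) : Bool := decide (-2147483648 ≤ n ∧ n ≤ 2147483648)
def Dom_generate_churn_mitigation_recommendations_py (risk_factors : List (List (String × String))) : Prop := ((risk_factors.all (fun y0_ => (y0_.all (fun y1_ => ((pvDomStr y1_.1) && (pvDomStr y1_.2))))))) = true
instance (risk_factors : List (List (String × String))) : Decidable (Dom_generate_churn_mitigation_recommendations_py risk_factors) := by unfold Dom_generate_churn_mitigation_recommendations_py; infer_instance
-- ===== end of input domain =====

-- B does one pass over risk_factors accumulating three presence flags and returns the entry of a precomputed 8-row outcome table (alternative decomposition; return-value equivalence on inputs where every dict has a 'factor' key).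


-- ===== PORT A =====
-- f['factor'] raises KeyError when the key is absent; the port keeps the Option and Pre_ excludes that case.
def generate_churn_mitigation_recommendations_py (risk_factors : List (List (String × String))) : List String :=
  let recommendations : List String := []
  let factor_types : List (Option String) := risk_factors.map (fun f => f.lookup "factor")
  let recommendations := if factor_types.contains (some "declining_bookings") then
      recommendations ++ ["Implement targeted marketing campaigns to re-engage customers",
                          "Offer loyalty rewards or discounts to previous customers"] else recommendations
  let recommendations := if factor_types.contains (some "high_cancellation_rate") then
      recommendations ++ ["Review cancellation policy and booking process",
                          "Implement pre-arrival communication to reduce cancellations"] else recommendations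
  let recommendations := if factor_types.contains (some "low_satisfaction") then
      recommendations ++ ["Conduct customer feedback survey to identify issues",
                          "Invest in service quality improvements"] else recommendations
  if recommendations = [] then ["Continue monitoring key metrics"] else recommendations

-- ===== PORT B =====
def pvDB : List String := ["Implement targeted marketing campaigns to re-engage customers",
                           "Offer loyalty rewards or discounts to previous customers"]
def pvHC : List String := ["Review cancellation policy and booking process",
                           "Implement pre-arrival communication to reduce cancellations"]
def pvLS : List String := ["Conduct customer feedback survey to identify issues",
                           "Invest in service quality improvements"]

-- Source B's _TABLE dict comprehension over the 8 flag triples, with its entries written out literally.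
def pvTable : List ((Bool × Bool × Bool) × List String) :=
  [((false, false, false), ["Continue monitoring key metrics"]),
   ((false, false, true),  pvLS),
   ((false, true,  false), pvHC),
   ((false, true,  true),  pvHC ++ pvLS),
   ((true,  false, false), pvDB),
   ((true,  false, true),  pvDB ++ pvLS),
   ((true,  true,  false), pvDB ++ pvHC),
   ((true,  true,  true),  pvDB ++ pvHC ++ pvLS)]

def generate_churn_mitigation_recommendations_py_alt (risk_factors : List (List (String × String))) : List String :=
  let flags : Bool × Bool × Bool := risk_factors.foldl (fun s f =>
      let t := f.lookup "factor"
      (s.1 || (t == some "declining_bookings"),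
       s.2.1 || (t == some "high_cancellation_rate"),
       s.2.2 || (t == some "low_satisfaction"))) (false, false, false)
  -- _TABLE[(db, hc, ls)]: the key is always present, so the default is never taken
  (pvTable.lookup flags).getD []

-- ===== PRECONDITION & SPEC =====
-- Pre_ excludes inputs where some dict lacks the 'factor' key: there Python A (and B) raise KeyError.
def Pre_generate_churn_mitigation_recommendations_py (risk_factors : List (List (String × String))) : Prop :=
  ∀ f ∈ risk_factors, (f.lookup "factor").isSome
instance (risk_factors : List (List (String × String))) : Decidable (Pre_generate_churn_mitigation_recommendations_py risk_factors) := by unfold Pre_generate_churn_mitigation_recommendations_py; infer_instance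
def pvWitness_generate_churn_mitigation_recommendations_py : (List (List (String × String))) :=
  [[("factor", "declining_bookings")], [("factor", "other")]]

def Spec_generate_churn_mitigation_recommendations_py (risk_factors : List (List (String × String))) (out : List String) : Prop := out = generate_churn_mitigation_recommendations_py_alt risk_factors
instance (risk_factors : List (List (String × String))) (out : List String) : Decidable (Spec_generate_churn_mitigation_recommendations_py risk_factors out) := by unfold Spec_generate_churn_mitigation_recommendations_py; infer_instance

-- ===== CLAIM (what is proved, stated in full; the proofs are below) =====
def Claim_equal_generate_churn_mitigation_recommendations_py : Prop := ∀ (risk_factors : List (List (String × String))), Dom_generate_churn_mitigation_recommendations_py risk_factors → Pre_generate_churn_mitigation_recommendations_py risk_factors → Spec_generate_churn_mitigation_recommendations_py risk_factors (generate_churn_mitigation_recommendations_py risk_factors)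

-- ===== LEMMAS AND PROOFS =====
-- the single pass computes exactly the three membership tests A performs
theorem pv_flags (rf : List (List (String × String))) (b1 b2 b3 : Bool) :
    rf.foldl (fun s f =>
      let t := f.lookup "factor"
      (s.1 || (t == some "declining_bookings"),
       s.2.1 || (t == some "high_cancellation_rate"),
       s.2.2 || (t == some "low_satisfaction"))) (b1, b2, b3)
    = (b1 || (rf.map (fun f => f.lookup "factor")).contains (some "declining_bookings"),
       b2 || (rf.map (fun f => f.lookup "factor")).contains (some "high_cancellation_rate"),
       b3 || (rf.map (fun f => f.lookup "factor")).contains (some "low_satisfaction")) := by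
  induction rf generalizing b1 b2 b3 with
  | nil => simp
  | cons h t ih =>
    simp only [List.foldl_cons, List.map_cons, List.contains_cons, ih, Bool.or_assoc]
    rw [BEq.comm (a := some "declining_bookings"), BEq.comm (a := some "high_cancellation_rate"),
        BEq.comm (a := some "low_satisfaction")]

-- ===== VERDICT (by name: the statement is the Claim_ definition above) =====
theorem generate_churn_mitigation_recommendations_py_spec : Claim_equal_generate_churn_mitigation_recommendations_py := by
  intro rf _ _
  unfold Spec_generate_churn_mitigation_recommendations_py
  unfold generate_churn_mitigation_recommendations_py generate_churn_mitigation_recommendations_py_alt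
  simp only [pv_flags, Bool.false_or]
  generalize (rf.map (fun f => f.lookup "factor")).contains (some "declining_bookings") = c1
  generalize (rf.map (fun f => f.lookup "factor")).contains (some "high_cancellation_rate") = c2
  generalize (rf.map (fun f => f.lookup "factor")).contains (some "low_satisfaction") = c3
  cases c1 <;> cases c2 <;> cases c3 <;> rfl
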